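-- pv_equiv track=rewrite | github.com/marquesarthur/programming_problems | interviewbit/interviewbit/arrays/maxspprod.py | maxSpecialProduct
-- ===== SOURCE A (Python) =====
-- def nearestGT(A):
--     # return indices of nearest greater elements (-1) if not found
--     res = []
--     stack = []
--     for i, x in enumerate(A):
--         # No point keeping further and smaller elements
--         while stack and stack[-1][1] <= x:
--             stack.pop()
--         k = stack[-1][0] if stack else -1
--         res.append(k)
--         stack.append((i, x))
--     return res
--
-- def maxSpecialProduct(A):
--     # We first first nearest greater element indices
--     # when scanning right to left.
--     # Then we can evaluate on the fly
--
--     if not A: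
--         return 0
--
--     MODU = 1000000007
--
--     n = len(A)
--     rightmost = [n - 1 - j if j >= 0 else 0 for j in nearestGT(reversed(A))]
--     rightmost.reverse()
--
--     leftmost = (max(0, j) for j in nearestGT(A))
--
--     return max(j * k for j, k in zip(leftmost, rightmost)) % MODU
-- ===== SOURCE B (Python) =====
-- def maxSpecialProduct(A):
--     # brute force: for each i, nearest strictly-greater index on each side (0 if none)
--     if not A:
--         return 0
--     n = len(A)
--     best = 0
--     for i in range(n):
--         left = 0
--         for j in range(i - 1, -1, -1):
--             if A[j] > A[i]:
--                 left = j
--                 break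
--         right = 0
--         for j in range(i + 1, n):
--             if A[j] > A[i]:
--                 right = j
--                 break
--         prod = left * right
--         if prod > best:
--             best = prod
--     return best % 1000000007
-- ===== Notes on version B (the rewrite author's own statement) =====
-- stated objective: simpler
-- what changed: Replaced A's monotonic-stack nearest-greater precomputation (with list reversal and index remapping for the right side) by a direct brute-force scan: for each index, walk left and right to the first strictly greater element and track the running maximum product.
import Mathlib
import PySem

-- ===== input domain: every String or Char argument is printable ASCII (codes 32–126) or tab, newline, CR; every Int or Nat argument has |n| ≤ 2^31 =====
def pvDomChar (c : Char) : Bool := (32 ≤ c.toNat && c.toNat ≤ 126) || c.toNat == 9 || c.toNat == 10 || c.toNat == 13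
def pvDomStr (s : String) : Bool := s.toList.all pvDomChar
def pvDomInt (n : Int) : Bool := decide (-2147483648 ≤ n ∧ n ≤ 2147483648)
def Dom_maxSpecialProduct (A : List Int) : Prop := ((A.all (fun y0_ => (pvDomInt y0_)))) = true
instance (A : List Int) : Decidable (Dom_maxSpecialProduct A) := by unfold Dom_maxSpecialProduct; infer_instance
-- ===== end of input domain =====

-- B is a brute-force O(n^2) re-implementation of A's monotonic-stack algorithm (objective: simpler); same return value, proved equal.

-- ===== PORT A =====
-- Python stack has its top at the END of the list; here the stack is kept top-at-HEAD
-- so that stack[-1]/pop/append become head operations (same values, same order of events).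
def popLE (x : Int) : List (Int × Int) → List (Int × Int)
  | [] => []
  | (j, v) :: rest => if v ≤ x then popLE x rest else (j, v) :: rest

def nearestGTGo : List (Int × Int) → List Int → List (Int × Int) → List Int
  | [], res, _ => res
  | (i, x) :: rest, res, stack =>
      let stack' := popLE x stack
      let k : Int := match stack' with
        | [] => -1
        | (j, _) :: _ => j
      nearestGTGo rest (res ++ [k]) ((i, x) :: stack')

def nearestGT (A : List Int) : List Int :=
  nearestGTGo (PySem.List.enumerate A) [] []

def maxSpecialProduct (A : List Int) : Int :=
  if A = [] then 0
  else
    let MODU : Int := 1000000007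
    let n : Int := (A.length : Int)
    let rightmost := ((nearestGT A.reverse).map (fun j => if j ≥ 0 then n - 1 - j else 0)).reverse
    let leftmost := (nearestGT A).map (fun j => max 0 j)
    match PySem.List.max? ((List.zip leftmost rightmost).map (fun p => p.1 * p.2)) (fun y => y) with
    | some m => PySem.Int.mod m MODU
    | none => 0

-- ===== PORT B =====
-- first index j in js with A[j] > x, else 0  (B's inner 'for j in range(...): if A[j] > A[i]: break')
def firstGT (A : List Int) (x : Int) : List Nat → Int
  | [] => 0
  | j :: rest => if A.getD j 0 > x then (j : Int) else firstGT A x rest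

def maxSpecialProduct_alt (A : List Int) : Int :=
  if A = [] then 0
  else
    let n := A.length
    let best := (List.range n).foldl (fun best i =>
      let x := A.getD i 0
      let l := firstGT A x (List.range i).reverse
      let r := firstGT A x (List.range' (i + 1) (n - i - 1))
      if l * r > best then l * r else best) 0
    PySem.Int.mod best 1000000007

-- ===== PRECONDITION & SPEC =====
def Spec_maxSpecialProduct (A : List Int) (out : Int) : Prop := out = maxSpecialProduct_alt A
instance (A : List Int) (out : Int) : Decidable (Spec_maxSpecialProduct A out) := by unfold Spec_maxSpecialProduct; infer_instance

-- ===== CLAIM (what is proved, stated in full; the proofs are below) =====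
def Claim_equal_maxSpecialProduct : Prop := ∀ (A : List Int), Dom_maxSpecialProduct A → Spec_maxSpecialProduct A (maxSpecialProduct A)

-- ===== LEMMAS AND PROOFS =====
-- Proof plan: the monotonic stack in A's nearestGT is characterised (survStack) as the
-- list of indices j whose value exceeds everything after them in the prefix, from which
-- the popped-to top is exactly the nearest strictly-greater index (nlIdx) that B scans for.

def pvQ (A : List Int) (i j : Nat) : Bool := decide (A.getD i 0 < A.getD j 0)
def pvP (A : List Int) (i j : Nat) : Bool :=
  (List.range' (j+1) (i-j-1)).all (fun k => decide (A.getD k 0 < A.getD j 0))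
def survStack (A : List Int) (i : Nat) : List (Int × Int) :=
  (((List.range i).filter (pvP A i)).reverse).map (fun (j : Nat) => ((j : Int), A.getD j 0))
def nlIdx (A : List Int) (i : Nat) : Option Nat := ((List.range i).reverse).find? (pvQ A i)
def nrIdx (A : List Int) (i n : Nat) : Option Nat := (List.range' (i+1) (n-i-1)).find? (pvQ A i)
def nlVal (A : List Int) (i : Nat) : Int := match nlIdx A i with | some j => (j : Int) | none => -1

theorem find_rev_range_none {q : Nat → Bool} {i : Nat}
    (h : ((List.range i).reverse).find? q = none) : ∀ k, k < i → q k = false := by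
  intro k hk
  have := List.find?_eq_none.mp h k (by simp [List.mem_reverse, List.mem_range, hk])
  simpa using this

theorem find_rev_range_some {q : Nat → Bool} : ∀ {i j : Nat},
    ((List.range i).reverse).find? q = some j →
    j < i ∧ q j = true ∧ ∀ k, j < k → k < i → q k = false := by
  intro i
  induction i with
  | zero => intro j h; simp at h
  | succ m ih =>
    intro j h
    rw [List.range_succ, List.reverse_append] at h
    simp only [List.reverse_singleton, List.singleton_append, List.find?_cons] at h
    by_cases hm : q m = true
    · rw [hm] at h; simp at h
      subst h
      exact ⟨Nat.lt_succ_self m, hm, fun k hk1 hk2 => by omega⟩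
    · rw [Bool.not_eq_true] at hm
      rw [hm] at h; simp at h
      obtain ⟨h1, h2, h3⟩ := ih h
      exact ⟨by omega, h2, fun k hk1 hk2 => by
        rcases Nat.lt_succ_iff_lt_or_eq.mp hk2 with hlt | heq
        · exact h3 k hk1 hlt
        · subst heq; exact hm⟩

theorem popLE_eq_filter (x : Int) : ∀ (l : List (Int × Int)),
    l.Pairwise (fun p q => p.2 < q.2) →
    popLE x l = l.filter (fun p => decide (x < p.2)) := by
  intro l
  induction l with
  | nil => intro _; rfl
  | cons hd tl ih =>
    intro hp
    obtain ⟨j, v⟩ := hd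
    rw [List.pairwise_cons] at hp
    by_cases hv : v ≤ x
    · simp [popLE, hv, ih hp.2, show ¬ (x < v) by omega]
    · rw [Int.not_le] at hv
      have htl : tl.filter (fun p => decide (x < p.2)) = tl := by
        apply List.filter_eq_self.mpr
        intro p hpmem
        have := hp.1 p hpmem
        simp only [decide_eq_true_eq]
        omega
      simp [popLE, show ¬ (v ≤ x) by omega, hv, htl]

theorem surv_pairwise (A : List Int) (i : Nat) :
    (survStack A i).Pairwise (fun p q => p.2 < q.2) := by
  unfold survStack
  rw [List.pairwise_map, List.pairwise_reverse]
  have base : ((List.range i).filter (pvP A i)).Pairwise (· < ·) :=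
    (List.pairwise_lt_range (n := i)).sublist List.filter_sublist
  apply base.imp_of_mem
  intro a b ha hb hab
  -- a < b, both survive at i; pvP A i a says all k in (a,i) have A[k] < A[a]; b is such a k
  have hb' : b < i := (List.mem_range.mp (List.mem_of_mem_filter hb))
  have hpa : pvP A i a = true := List.of_mem_filter ha
  unfold pvP at hpa
  rw [List.all_eq_true] at hpa
  have := hpa b (by
    apply List.mem_range'.mpr
    exact ⟨b - (a+1), by omega, by omega⟩)
  simpa using this

theorem pvP_succ (A : List Int) (i j : Nat) (h : j < i) :
    pvP A (i+1) j = (pvP A i j && pvQ A i j) := by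
  unfold pvP pvQ
  have : List.range' (j+1) (i+1-j-1) = List.range' (j+1) (i-j-1) ++ [i] := by
    have h1 : i + 1 - j - 1 = (i - j - 1) + 1 := by omega
    rw [h1, List.range'_1_concat]
    congr 1
    simp
    omega
  rw [this, List.all_append]
  simp

theorem filter_step (A : List Int) (i : Nat) :
    (List.range i).filter (pvP A (i+1)) =
    ((List.range i).filter (pvP A i)).filter (pvQ A i) := by
  rw [List.filter_filter]
  apply List.filter_congr
  intro j hj
  rw [pvP_succ A i j (List.mem_range.mp hj)]
  simp [Bool.and_comm]

theorem popLE_surv (A : List Int) (i : Nat) :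
    popLE (A.getD i 0) (survStack A i) =
    (((List.range i).filter (pvP A (i+1))).reverse).map (fun (j : Nat) => ((j : Int), A.getD j 0)) := by
  rw [popLE_eq_filter _ _ (surv_pairwise A i)]
  unfold survStack
  rw [List.filter_map, filter_step, List.filter_reverse]
  congr 2


theorem surv_succ (A : List Int) (i : Nat) :
    survStack A (i+1) = ((i : Int), A.getD i 0) :: popLE (A.getD i 0) (survStack A i) := by
  rw [popLE_surv]
  unfold survStack
  rw [List.range_succ, List.filter_append]
  have hi : (List.filter (pvP A (i+1)) [i]) = [i] := by
    simp [pvP]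
  rw [hi, List.reverse_append]
  simp

theorem head_popLE (A : List Int) (i : Nat) :
    (match popLE (A.getD i 0) (survStack A i) with
     | [] => (-1 : Int)
     | (j, _) :: _ => j) = nlVal A i := by
  rw [popLE_surv]
  unfold nlVal nlIdx
  cases hf : ((List.range i).reverse).find? (pvQ A i) with
  | none =>
    have hq := find_rev_range_none hf
    have hnil : (List.range i).filter (pvP A (i+1)) = [] := by
      rw [filter_step]
      apply List.filter_eq_nil_iff.mpr
      intro j hj
      have hj' := List.mem_range.mp (List.mem_of_mem_filter hj)
      simp [hq j hj']
    simp [hnil]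
  | some j =>
    obtain ⟨hji, hqj, hmax⟩ := find_rev_range_some hf
    have hsplit : List.range i = List.range (j+1) ++ List.range' (j+1) (i-j-1) := by
      rw [List.range_eq_range', List.range_eq_range' (n := j+1)]
      have := List.range'_append (s := 0) (m := j+1) (n := i-j-1) (step := 1)
      rw [show (0 + 1 * (j+1)) = j+1 from by omega] at this
      rw [this]
      congr 1
      omega
    have htail : (List.range' (j+1) (i-j-1)).filter (pvP A (i+1)) = [] := by
      apply List.filter_eq_nil_iff.mpr
      intro k hk
      have hk' := List.mem_range'.mp hk
      obtain ⟨t, ht, hkt⟩ := hk'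
      have hkb : j < k ∧ k < i := by omega
      rw [pvP_succ A i k hkb.2]
      simp [hmax k hkb.1 hkb.2]
    have hj1 : (List.range (j+1)).filter (pvP A (i+1)) = (List.range j).filter (pvP A (i+1)) ++ [j] := by
      rw [List.range_succ, List.filter_append]
      congr 1
      have hpj : pvP A (i+1) j = true := by
        rw [pvP_succ A i j hji]
        have hPij : pvP A i j = true := by
          unfold pvP
          rw [List.all_eq_true]
          intro k hk
          obtain ⟨t, ht, hkt⟩ := List.mem_range'.mp hk
          have hq1 : pvQ A i k = false := hmax k (by omega) (by omega)
          unfold pvQ at hq1 hqj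
          simp only [decide_eq_true_eq, decide_eq_false_iff_not] at hq1 hqj
          simp only [decide_eq_true_eq]
          omega
        simp [hPij, hqj]
      simp [hpj]
    rw [hsplit, List.filter_append, htail, hj1]
    simp

theorem go_spec (A : List Int) : ∀ (suf : List Int) (i : Nat) (res : List Int), A.drop i = suf →
    nearestGTGo (PySem.List.enumerate suf (i : Int)) res (survStack A i) =
    res ++ (List.range' i suf.length).map (nlVal A) := by
  intro suf
  induction suf with
  | nil => intro i res _; simp [PySem.List.enumerate_nil, nearestGTGo]
  | cons x suf' ih =>
    intro i res h
    have hx : A.getD i 0 = x := by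
      have h0 : A[i]? = some x := by
        have := List.getElem?_drop (xs := A) (i := i) (j := 0)
        rw [h] at this
        simpa using this.symm
      simp [List.getD, h0]
    have hdrop : A.drop (i+1) = suf' := by
      have := List.drop_drop (i := 1) (j := i) (l := A)
      rw [h] at this
      simpa using this.symm
    rw [PySem.List.enumerate_cons]
    show nearestGTGo _ _ _ = _
    rw [nearestGTGo]
    have hk : (match popLE x (survStack A i) with
        | [] => (-1 : Int) | (j, _) :: _ => j) = nlVal A i := by
      rw [← hx]; exact head_popLE A i
    have hstack : (((i : Int), x) :: popLE x (survStack A i)) = survStack A (i+1) := by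
      rw [← hx]; exact (surv_succ A i).symm
    rw [hk, hstack, show ((i : Int) + 1) = ((i + 1 : Nat) : Int) from by push_cast; ring]
    rw [ih (i+1) (res ++ [nlVal A i]) hdrop]
    rw [List.length_cons, List.range'_succ]
    simp

theorem find?_congr_mem {α : Type} {p q : α → Bool} : ∀ {l : List α},
    (∀ a ∈ l, p a = q a) → l.find? p = l.find? q := by
  intro l
  induction l with
  | nil => intro _; rfl
  | cons a tl ih =>
    intro h
    rw [List.find?_cons, List.find?_cons, h a (by simp)]
    cases hq : q a
    · simp [ih (fun b hb => h b (by simp [hb]))]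
    · simp

theorem nearestGT_eq (A : List Int) :
    nearestGT A = (List.range A.length).map (nlVal A) := by
  unfold nearestGT
  have h0 : survStack A 0 = [] := by simp [survStack]
  have hg := go_spec A A 0 [] (by simp)
  rw [h0] at hg
  simpa [List.range_eq_range'] using hg

theorem firstGT_eq (A : List Int) (x : Int) : ∀ js : List Nat,
    firstGT A x js = (match js.find? (fun j => decide (x < A.getD j 0)) with
      | some j => (j : Int) | none => 0) := by
  intro js
  induction js with
  | nil => rfl
  | cons j rest ih =>
    rw [firstGT, List.find?_cons]
    simp only [List.getD] at ih ⊢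
    by_cases hj : x < A[j]?.getD 0
    · simp [hj]
    · simp [hj, ih]

def pvL (A : List Int) (i : Nat) : Int := match nlIdx A i with | some j => (j : Int) | none => 0
def pvR (A : List Int) (n i : Nat) : Int := match nrIdx A i n with | some j => (j : Int) | none => 0

theorem nlIdx_reverse (A : List Int) (i : Nat) (hi : i < A.length) :
    nlIdx A.reverse (A.length - 1 - i) = (nrIdx A i A.length).map (fun j => A.length - 1 - j) := by
  unfold nlIdx nrIdx
  set n := A.length with hn
  set m := n - 1 - i with hm
  have hrange : (List.range m).reverse = (List.range' (i+1) (n-i-1)).map (fun t => n - 1 - t) := by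
    apply List.ext_getElem
    · simp; omega
    · intro t h1 h2
      simp only [List.getElem_reverse, List.length_range, List.getElem_range, List.getElem_map,
        List.getElem_range']
      simp at h1 h2
      omega
  have hgetm : A.reverse.getD m 0 = A.getD i 0 := by
    have hmn : m < n := by omega
    have := List.getElem?_reverse (l := A) (i := m) (by omega)
    rw [show n - 1 - m = i from by omega] at this
    simp [List.getD, this]
  rw [hrange, List.find?_map]
  congr 1
  apply find?_congr_mem
  intro t ht
  obtain ⟨c, hc1, hc2⟩ := List.mem_range'.mp ht
  have htn : t < n ∧ i < t := by omega
  have hget : A.reverse.getD (n - 1 - t) 0 = A.getD t 0 := by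
    have := List.getElem?_reverse (l := A) (i := n - 1 - t) (by omega)
    rw [show n - 1 - (n - 1 - t) = t from by omega] at this
    simp [List.getD, this]
  simp only [Function.comp, pvQ, hgetm, hget]

theorem pvL_nonneg (A : List Int) (i : Nat) : 0 ≤ pvL A i := by
  unfold pvL; cases nlIdx A i <;> simp

theorem pvR_nonneg (A : List Int) (n i : Nat) : 0 ≤ pvR A n i := by
  unfold pvR; cases nrIdx A i n <;> simp

theorem max_zero_nlVal (A : List Int) (i : Nat) : max 0 (nlVal A i) = pvL A i := by
  unfold nlVal pvL
  cases nlIdx A i with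
  | none => rfl
  | some j => simp

theorem rightmost_entry (A : List Int) (i : Nat) (hi : i < A.length) :
    (if nlVal A.reverse (A.length - 1 - i) ≥ 0
     then (A.length : Int) - 1 - nlVal A.reverse (A.length - 1 - i) else 0) = pvR A A.length i := by
  unfold nlVal pvR
  rw [nlIdx_reverse A i hi]
  cases hf : nrIdx A i A.length with
  | none => simp
  | some j =>
    have hj : j < A.length := by
      unfold nrIdx at hf
      have := List.mem_range'.mp (List.mem_of_find?_eq_some hf)
      omega
    simp only [Option.map_some]
    have h0 : (0 : Int) ≤ ((A.length - 1 - j : Nat) : Int) := by positivity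
    rw [if_pos h0]
    omega

theorem maxSpecialProduct_eq (A : List Int) : maxSpecialProduct A = maxSpecialProduct_alt A := by
  by_cases hA : A = []
  · subst hA; rfl
  · have hn1 : 1 ≤ A.length := by
      cases A with
      | nil => exact absurd rfl hA
      | cons a l => simp
    have hleft : (nearestGT A).map (fun j => max 0 j) = (List.range A.length).map (pvL A) := by
      rw [nearestGT_eq, List.map_map]
      apply List.map_congr_left
      intro i _
      simp [Function.comp, max_zero_nlVal]
    have hright : ((nearestGT A.reverse).map
          (fun j => if j ≥ 0 then (A.length : Int) - 1 - j else 0)).reverse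
        = (List.range A.length).map (pvR A A.length) := by
      rw [nearestGT_eq, List.map_map, ← List.map_reverse, List.length_reverse,
        List.range_eq_range', List.reverse_range', List.map_map, ← List.range_eq_range']
      apply List.map_congr_left
      intro i hi
      have hi' : i < A.length := List.mem_range.mp hi
      simp only [Function.comp]
      have := rightmost_entry A i hi'
      rw [show (0 + A.length - 1 - i) = A.length - 1 - i from by omega]
      exact this
    have hPmap : ∀ n, (List.map ((fun p => p.1 * p.2) ∘ fun a => (pvL A a, pvR A n a)) (List.range n))
        = (List.range n).map (fun i => pvL A i * pvR A n i) := by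
      intro n
      apply List.map_congr_left; intro i _; simp
    have hbody : (List.range A.length).foldl (fun best i =>
        let x := A.getD i 0
        let l := firstGT A x (List.range i).reverse
        let r := firstGT A x (List.range' (i + 1) (A.length - i - 1))
        if l * r > best then l * r else best) 0
        = (List.range A.length).foldl
            (fun best i => max best (pvL A i * pvR A A.length i)) 0 := by
      apply PySem.List.foldl_congr_mem
      intro best i _
      have hl : firstGT A (A.getD i 0) (List.range i).reverse = pvL A i := by
        rw [firstGT_eq]
        unfold pvL nlIdx pvQ
        rfl
      have hr : firstGT A (A.getD i 0) (List.range' (i + 1) (A.length - i - 1)) = pvR A A.length i := by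
        rw [firstGT_eq]
        unfold pvR nrIdx pvQ
        rfl
      simp only [hl, hr]
      split_ifs <;> omega
    unfold maxSpecialProduct maxSpecialProduct_alt
    rw [if_neg hA, if_neg hA]
    show (match PySem.List.max? ((((nearestGT A).map (fun j => max 0 j)).zip
          (((nearestGT A.reverse).map (fun j => if j ≥ 0 then (A.length : Int) - 1 - j else 0)).reverse)).map
          (fun p => p.1 * p.2)) (fun y => y) with
      | some m => PySem.Int.mod m 1000000007
      | none => 0)
      = PySem.Int.mod ((List.range A.length).foldl (fun best i =>
          let x := A.getD i 0
          let l := firstGT A x (List.range i).reverse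
          let r := firstGT A x (List.range' (i + 1) (A.length - i - 1))
          if l * r > best then l * r else best) 0) 1000000007
    rw [hleft, hright, List.zip_map', List.map_map, hPmap, hbody]
    obtain ⟨m, hm⟩ : ∃ m, A.length = m + 1 := ⟨A.length - 1, by omega⟩
    rw [hm, List.range_eq_range', List.range'_succ, List.map_cons, PySem.List.max?_id_cons]
    show PySem.Int.mod _ 1000000007 = PySem.Int.mod _ 1000000007
    congr 1
    rw [List.foldl_cons]
    have h00 : max 0 (pvL A 0 * pvR A (m+1) 0) = pvL A 0 * pvR A (m+1) 0 := by
      have : 0 ≤ pvL A 0 * pvR A (m+1) 0 := mul_nonneg (pvL_nonneg A 0) (pvR_nonneg A (m+1) 0)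
      omega
    rw [h00]
    simp [List.foldl_map]

-- ===== VERDICT (by name: the statement is the Claim_ definition above) =====
theorem maxSpecialProduct_spec : Claim_equal_maxSpecialProduct := by
  intro A _
  unfold Spec_maxSpecialProduct
  exact maxSpecialProduct_eq A
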